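-- pv_equiv track=rewrite | github.com/BingqiangZhou/AutoFillForm | Codes/utils/markdown_renderer.py | _render_blockquotes
-- ===== SOURCE A (Python) =====
-- def _render_blockquotes(text: str) -> str:
--     """Render blockquotes (> text)."""
--     lines = text.split('\n')
--     result = []
--     in_blockquote = False
--     blockquote_content = []
--
--     for line in lines:
--         if line.startswith('&gt;') or (line.startswith('>')):
--             content = line.lstrip('&gt;').lstrip('>').strip()
--             blockquote_content.append(content)
--             if not in_blockquote:
--                 in_blockquote = True
--         else:
--             if in_blockquote:
--                 result.append(f'<blockquote>{"".join(blockquote_content)}</blockquote>')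
--                 blockquote_content = []
--                 in_blockquote = False
--             result.append(line)
--
--     if in_blockquote:
--         result.append(f'<blockquote>{"".join(blockquote_content)}</blockquote>')
--
--     return '\n'.join(result)
-- ===== SOURCE B (Python) =====
-- def _render_blockquotes(text: str) -> str:
--     """Render blockquotes (> text)."""
--     out = []
--     pending = None  # joined content of the blockquote run starting at the current line
--     for line in reversed(text.split('\n')):
--         if line.startswith('&gt;') or line.startswith('>'):
--             content = line.lstrip('&gt;').lstrip('>').strip()
--             pending = content + (pending if pending is not None else '')
--         elif pending is not None:
--             out.append('<blockquote>%s</blockquote>' % pending)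
--             out.append(line)
--             pending = None
--         else:
--             out.append(line)
--     if pending is not None:
--         out.append('<blockquote>%s</blockquote>' % pending)
--     out.reverse()
--     return '\n'.join(out)
-- ===== Notes on version B (the rewrite author's own statement) =====
-- stated objective: alternative
-- what changed: Builds the output back-to-front: one right-to-left pass over the lines that carries the pending blockquote run content as a single already-joined Optional[str] (emitting the <blockquote> element when the pass steps off the top of the run, then reversing the output), instead of A's left-to-right pass with a boolean in_blockquote flag and a list buffer flushed with a separatorless join.
import Mathlib
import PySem

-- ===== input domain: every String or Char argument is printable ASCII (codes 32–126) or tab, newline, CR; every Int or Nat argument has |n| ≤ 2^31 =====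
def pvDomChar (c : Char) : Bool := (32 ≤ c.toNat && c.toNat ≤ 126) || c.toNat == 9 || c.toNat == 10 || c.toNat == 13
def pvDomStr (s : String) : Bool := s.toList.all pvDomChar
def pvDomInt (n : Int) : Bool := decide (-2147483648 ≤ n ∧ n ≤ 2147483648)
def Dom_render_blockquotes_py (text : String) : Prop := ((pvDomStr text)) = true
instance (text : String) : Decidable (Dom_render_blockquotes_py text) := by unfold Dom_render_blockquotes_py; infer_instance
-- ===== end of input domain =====

-- B builds the output back-to-front: a right-to-left pass carrying the pending run
-- content as one joined Option string, instead of A's flag + buffer + flush (same cost).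

-- shared glue both Pythons spell identically:
-- line.startswith('&gt;') or line.startswith('>')
def pvIsBq (line : List Char) : Bool :=
  PySem.Chars.startswith line "&gt;".toList || PySem.Chars.startswith line ">".toList

-- exact hand port of str.lstrip(chars) (PySem.Chars.lstrip is the no-argument form):
-- drop leading characters that occur in `chars`
def pvLstripSet (s : List Char) (chars : List Char) : List Char :=
  s.dropWhile (fun c => chars.contains c)

-- line.lstrip('&gt;').lstrip('>').strip()
def pvClean (line : List Char) : List Char :=
  PySem.Chars.strip (pvLstripSet (pvLstripSet line "&gt;".toList) ">".toList)

-- ===== PORT A =====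
-- f'<blockquote>{"".join(blockquote_content)}</blockquote>'
def pvBq (content : List (List Char)) : List Char :=
  "<blockquote>".toList ++ PySem.Chars.join [] content ++ "</blockquote>".toList

-- A's for-loop over the remaining lines; state = (result, in_blockquote, blockquote_content);
-- the `if in_blockquote` flush after the loop is the [] case
def pvLoopA : List (List Char) → List (List Char) → Bool → List (List Char) → List (List Char)
  | [], result, inBq, content => if inBq then result ++ [pvBq content] else result
  | line :: rest, result, inBq, content =>
      if pvIsBq line then
        pvLoopA rest result true (content ++ [pvClean line])
      else if inBq then
        pvLoopA rest (result ++ [pvBq content] ++ [line]) false []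
      else
        pvLoopA rest (result ++ [line]) inBq content

def render_blockquotes_py (text : String) : String :=
  String.ofList (PySem.Chars.join ['\n'] (pvLoopA (PySem.Chars.splitOn text.toList ['\n']) [] false []))

-- ===== PORT B =====
-- '<blockquote>%s</blockquote>' % p
def pvBqStr (p : List Char) : List Char :=
  "<blockquote>".toList ++ p ++ "</blockquote>".toList

-- B's `for line in reversed(lines)` loop; state = (out, pending);
-- the [] case is the trailing `if pending is not None` flush plus out.reverse()
def pvLoopB : List (List Char) → List (List Char) → Option (List Char) → List (List Char)
  | [], out, pending =>
      (match pending with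
       | some p => out ++ [pvBqStr p]
       | none => out).reverse
  | line :: rest, out, pending =>
      if pvIsBq line then
        pvLoopB rest out (some (pvClean line ++ pending.getD []))
      else
        match pending with
        | some p => pvLoopB rest (out ++ [pvBqStr p, line]) none
        | none => pvLoopB rest (out ++ [line]) none

def render_blockquotes_py_alt (text : String) : String :=
  String.ofList (PySem.Chars.join ['\n']
    (pvLoopB (PySem.Chars.splitOn text.toList ['\n']).reverse [] none))

-- ===== PRECONDITION & SPEC =====
def Spec_render_blockquotes_py (text : String) (out : String) : Prop := out = render_blockquotes_py_alt text
instance (text : String) (out : String) : Decidable (Spec_render_blockquotes_py text out) := by unfold Spec_render_blockquotes_py; infer_instance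

-- ===== CLAIM (what is proved, stated in full; the proofs are below) =====
def Claim_equal_render_blockquotes_py : Prop := ∀ (text : String), Dom_render_blockquotes_py text → Spec_render_blockquotes_py text (render_blockquotes_py text)

-- ===== LEMMAS AND PROOFS =====

-- common recursive reading of both passes: pvG lines = (rendered lines after the leading
-- blockquote run, joined content of the leading run — none if the first line is not a quote)
def pvG : List (List Char) → List (List Char) × Option (List Char)
  | [] => ([], none)
  | l :: rest =>
      let (r, p) := pvG rest
      if pvIsBq l then (r, some (pvClean l ++ p.getD []))
      else
        (l :: (match p with
               | some q => pvBqStr q :: r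
               | none => r), none)

def pvFin : List (List Char) × Option (List Char) → List (List Char)
  | (r, some q) => pvBqStr q :: r
  | (r, none) => r

theorem pvJoin_append (xs : List (List Char)) (y : List Char) :
    PySem.Chars.join [] (xs ++ [y]) = PySem.Chars.join [] xs ++ y := by
  induction xs with
  | nil => simp [PySem.Chars.join_nil, PySem.Chars.join_singleton]
  | cons a as ih =>
    cases as with
    | nil => simp [PySem.Chars.join_cons_cons, PySem.Chars.join_singleton]
    | cons b bs => simpa [PySem.Chars.join_cons_cons] using ih

theorem pvBq_eq (content : List (List Char)) :
    pvBq content = pvBqStr (PySem.Chars.join [] content) := rfl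

-- A's loop, characterised by pvG
theorem pvLoopA_eq (lines : List (List Char)) :
    (∀ result, pvLoopA lines result false [] = result ++ pvFin (pvG lines)) ∧
    (∀ result content, pvLoopA lines result true content
        = result ++ pvBqStr (PySem.Chars.join [] content ++ (pvG lines).2.getD []) :: (pvG lines).1) := by
  induction lines with
  | nil =>
    refine ⟨fun result => by simp [pvLoopA, pvG, pvFin], fun result content => by
      simp [pvLoopA, pvG, pvBq_eq]⟩
  | cons l rest ih =>
    obtain ⟨ih1, ih2⟩ := ih
    rcases hG : pvG rest with ⟨r, p⟩
    rw [hG] at ih2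
    constructor
    · intro result
      by_cases hb : pvIsBq l = true
      · rw [show pvLoopA (l :: rest) result false [] = pvLoopA rest result true [pvClean l] by
          simp [pvLoopA, hb], ih2]
        cases p <;>
          simp [pvG, hG, hb, pvFin, PySem.Chars.join_singleton]
      · rw [show pvLoopA (l :: rest) result false [] = pvLoopA rest (result ++ [l]) false [] by
          simp [pvLoopA, hb], ih1, hG]
        cases p <;>
          simp [pvG, hG, hb, pvFin]
    · intro result content
      by_cases hb : pvIsBq l = true
      · rw [show pvLoopA (l :: rest) result true content
              = pvLoopA rest result true (content ++ [pvClean l]) by simp [pvLoopA, hb], ih2]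
        cases p <;>
          simp [pvG, hG, hb, pvJoin_append]
      · rw [show pvLoopA (l :: rest) result true content
              = pvLoopA rest (result ++ [pvBq content] ++ [l]) false [] by simp [pvLoopA, hb], ih1, hG]
        cases p <;>
          simp [pvG, hG, hb, pvFin, pvBq_eq]

-- B's loop split into its state transformers (proof helpers only)
def pvOutAfter : List (List Char) → List (List Char) → Option (List Char) → List (List Char)
  | [], out, _ => out
  | line :: rest, out, pending =>
      if pvIsBq line then pvOutAfter rest out (some (pvClean line ++ pending.getD []))
      else
        match pending with
        | some p => pvOutAfter rest (out ++ [pvBqStr p, line]) none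
        | none => pvOutAfter rest (out ++ [line]) none

def pvPAfter : List (List Char) → Option (List Char) → Option (List Char)
  | [], pending => pending
  | line :: rest, pending =>
      if pvIsBq line then pvPAfter rest (some (pvClean line ++ pending.getD []))
      else pvPAfter rest none

theorem pvLoopB_state (xs : List (List Char)) :
    ∀ out pending, pvLoopB xs out pending = pvLoopB [] (pvOutAfter xs out pending) (pvPAfter xs pending) := by
  induction xs with
  | nil => intro out pending; rfl
  | cons l rest ih =>
    intro out pending
    by_cases hb : pvIsBq l = true
    · simp [pvLoopB, pvOutAfter, pvPAfter, hb, ih]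
    · cases pending <;> simp [pvLoopB, pvOutAfter, pvPAfter, hb, ih]

theorem pvOutAfter_append (xs ys : List (List Char)) :
    ∀ out pending, pvOutAfter (xs ++ ys) out pending
      = pvOutAfter ys (pvOutAfter xs out pending) (pvPAfter xs pending) := by
  induction xs with
  | nil => intro out pending; rfl
  | cons l rest ih =>
    intro out pending
    by_cases hb : pvIsBq l = true
    · simp [pvOutAfter, pvPAfter, hb, ih]
    · cases pending <;> simp [pvOutAfter, pvPAfter, hb, ih]

theorem pvPAfter_append (xs ys : List (List Char)) :
    ∀ pending, pvPAfter (xs ++ ys) pending = pvPAfter ys (pvPAfter xs pending) := by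
  induction xs with
  | nil => intro pending; rfl
  | cons l rest ih =>
    intro pending
    by_cases hb : pvIsBq l = true
    · simp [pvPAfter, hb, ih]
    · cases pending <;> simp [pvPAfter, hb, ih]

-- B's reversed pass, characterised by pvG
theorem pvLoopB_eq (lines : List (List Char)) :
    pvOutAfter lines.reverse [] none = (pvG lines).1.reverse ∧
    pvPAfter lines.reverse none = (pvG lines).2 := by
  induction lines with
  | nil => exact ⟨rfl, rfl⟩
  | cons l rest ih =>
    obtain ⟨ih1, ih2⟩ := ih
    rcases hG : pvG rest with ⟨r, p⟩
    rw [hG] at ih1 ih2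
    have hrev : (l :: rest).reverse = rest.reverse ++ [l] := by simp
    constructor
    · rw [hrev, pvOutAfter_append, ih1, ih2]
      by_cases hb : pvIsBq l = true
      · simp [pvOutAfter, pvG, hG, hb]
      · cases p <;>
          simp [pvOutAfter, pvG, hG, hb]
    · rw [hrev, pvPAfter_append, ih2]
      by_cases hb : pvIsBq l = true
      · simp [pvPAfter, pvG, hG, hb]
      · simp [pvPAfter, pvG, hG, hb]

theorem pvLoopB_fin (lines : List (List Char)) :
    pvLoopB lines.reverse [] none = pvFin (pvG lines) := by
  rw [pvLoopB_state, (pvLoopB_eq lines).1, (pvLoopB_eq lines).2]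
  rcases hG : pvG lines with ⟨r, p⟩
  cases p <;> simp [pvLoopB, pvFin]

-- ===== VERDICT (by name: the statement is the Claim_ definition above) =====
theorem render_blockquotes_py_spec : Claim_equal_render_blockquotes_py := by
  intro text _
  unfold Spec_render_blockquotes_py render_blockquotes_py render_blockquotes_py_alt
  rw [pvLoopB_fin, (pvLoopA_eq (PySem.Chars.splitOn text.toList ['\n'])).1 []]
  simp
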